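-- pv_equiv track=rewrite | github.com/JHAMILCALI/MATERIAL_INFORMATICA | PRIMER SEMESTRE/INF-111 PROGRAMACION 1/LABORATORIO/LABORATORIO 10/Ejercio 4.py | sacarpalmqj
-- ===== SOURCE A (Python) =====
-- def sacarpalmqj(bmqj, kmqj):
--     bmqj=bmqj+" "
--     cmqj=0; wmqj=""; vmqj=""
--     elemqj = len(bmqj)
--     for imqj in range(1,elemqj+1):
--         ymqj = bmqj[imqj-1:imqj]
--         if ymqj==" ":
--             cmqj=cmqj+1
--             if cmqj==kmqj:
--                 wmqj=vmqj
--             vmqj=""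
--         else: vmqj=vmqj+ymqj
--     return wmqj
-- ===== SOURCE B (Python) =====
-- def sacarpalmqj(bmqj, kmqj):
--     parts = bmqj.split(" ")
--     if 1 <= kmqj <= len(parts):
--         return parts[kmqj - 1]
--     return ""
-- ===== Notes on version B (the rewrite author's own statement) =====
-- stated objective: simpler
-- what changed: Replaces the character-by-character counting/accumulation loop (with per-character slicing and quadratic string concatenation) by a one-shot single-space split plus a bounds-checked direct index.
import Mathlib
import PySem

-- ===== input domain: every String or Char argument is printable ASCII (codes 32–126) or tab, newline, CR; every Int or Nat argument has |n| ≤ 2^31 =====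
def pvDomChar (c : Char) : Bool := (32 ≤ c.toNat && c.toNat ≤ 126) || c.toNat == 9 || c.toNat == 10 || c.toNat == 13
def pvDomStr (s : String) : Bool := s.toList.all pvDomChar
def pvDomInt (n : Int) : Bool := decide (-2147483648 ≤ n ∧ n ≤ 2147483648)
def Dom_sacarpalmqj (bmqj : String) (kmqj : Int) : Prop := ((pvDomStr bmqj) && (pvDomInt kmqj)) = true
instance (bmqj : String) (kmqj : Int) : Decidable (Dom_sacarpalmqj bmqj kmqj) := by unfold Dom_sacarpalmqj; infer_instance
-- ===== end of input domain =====

-- B replaces A's character-by-character counting/accumulation loop with a one-shot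
-- single-space split plus a bounds-checked direct index (objective: simpler).

-- ===== PORT A =====
-- loop body of A's for-loop, named so the proofs can refer to it (state = (cmqj, wmqj, vmqj))
def pvStepA (b : String) (kmqj : Int) (s : Int × String × String) (imqj : Int) : Int × String × String :=
  let ymqj := PySem.Str.slice b (some (imqj - 1)) (some imqj)
  if ymqj == " " then
    let c := s.1 + 1
    let w := if c == kmqj then s.2.2 else s.2.1
    (c, w, "")
  else (s.1, s.2.1, s.2.2 ++ ymqj)

def sacarpalmqj (bmqj : String) (kmqj : Int) : String :=
  let b := bmqj ++ " "
  let elemqj : Int := PySem.Str.len b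
  let st := (PySem.List.pyRange 1 (elemqj + 1) 1).foldl (pvStepA b kmqj) (0, "", "")
  st.2.1

-- ===== PORT B =====
-- bmqj.split(" ") for the single-character separator " " (exact: fields between
-- single spaces, empty fields preserved, split of "" is [""])
def splitSp : List Char → List (List Char)
  | [] => [[]]
  | c :: t =>
    if c = ' ' then [] :: splitSp t
    else
      match splitSp t with
      | [] => [[c]]
      | h :: r => (c :: h) :: r

def sacarpalmqj_alt (bmqj : String) (kmqj : Int) : String :=
  let parts := splitSp bmqj.toList
  -- parts[kmqj-1] under the guard 1 <= kmqj <= len(parts): the index is in range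
  if 1 ≤ kmqj ∧ kmqj ≤ (parts.length : Int) then String.ofList (parts.getD (kmqj - 1).toNat []) else ""

-- ===== PRECONDITION & SPEC =====
def Spec_sacarpalmqj (bmqj : String) (kmqj : Int) (out : String) : Prop := out = sacarpalmqj_alt bmqj kmqj
instance (bmqj : String) (kmqj : Int) (out : String) : Decidable (Spec_sacarpalmqj bmqj kmqj out) := by unfold Spec_sacarpalmqj; infer_instance

-- ===== CLAIM (what is proved, stated in full; the proofs are below) =====
def Claim_equal_sacarpalmqj : Prop := ∀ (bmqj : String) (kmqj : Int), Dom_sacarpalmqj bmqj kmqj → Spec_sacarpalmqj bmqj kmqj (sacarpalmqj bmqj kmqj)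

-- ===== LEMMAS AND PROOFS =====

-- A's loop re-expressed structurally over the characters (proof helper)
def stepChar (km : Int) (s : Int × List Char × List Char) (ch : Char) : Int × List Char × List Char :=
  if ch = ' ' then
    (s.1 + 1, if s.1 + 1 = km then s.2.2 else s.2.1, [])
  else (s.1, s.2.1, s.2.2 ++ [ch])

def charLoop (km : Int) : List Char → (Int × List Char × List Char) → (Int × List Char × List Char)
  | [], s => s
  | ch :: t, s => charLoop km t (stepChar km s ch)

lemma splitSp_ne_nil (cs : List Char) : splitSp cs ≠ [] := by
  cases cs with
  | nil => simp [splitSp]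
  | cons c t =>
    simp only [splitSp]
    split
    · simp
    · split <;> simp

lemma length_splitSp (cs : List Char) : (splitSp cs).length = cs.count ' ' + 1 := by
  induction cs with
  | nil => simp [splitSp]
  | cons c t ih =>
    simp only [splitSp]
    by_cases h : c = ' '
    · simp [h, ih]
    · rcases hs : splitSp t with _ | ⟨hd, r⟩
      · exact absurd hs (splitSp_ne_nil t)
      · simp [h, hs] at ih ⊢
        omega

lemma splitSp_sep_append (v t : List Char) (hv : ' ' ∉ v) :
    splitSp (v ++ ' ' :: t) = v :: splitSp t := by
  induction v with
  | nil => simp [splitSp]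
  | cons c v' ih =>
    have hc : ¬ c = ' ' := by intro h; exact hv (by simp [h])
    have hv' : ' ' ∉ v' := fun h => hv (by simp [h])
    simp only [List.cons_append, splitSp, hc, if_false]
    rw [ih hv']

lemma splitSp_append_space (cs : List Char) :
    splitSp (cs ++ [' ']) = splitSp cs ++ [[]] := by
  induction cs with
  | nil => simp [splitSp]
  | cons c t ih =>
    by_cases h : c = ' '
    · simp [splitSp, h, ih]
    · rcases hs : splitSp t with _ | ⟨hd, r⟩
      · exact absurd hs (splitSp_ne_nil t)
      · simp [splitSp, h, ih, hs]

-- the value of A's loop, characterised via splitSp (hv: the accumulator holds no space)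
lemma charLoop_w (km : Int) : ∀ (cs : List Char) (c : Int) (w v : List Char), ' ' ∉ v →
    (charLoop km cs (c, w, v)).2.1 =
      if c < km ∧ km ≤ c + (cs.count ' ' : Int)
      then (splitSp (v ++ cs)).getD (km - c - 1).toNat []
      else w := by
  intro cs
  induction cs with
  | nil =>
    intro c w v hv
    simp [charLoop]
  | cons ch t ih =>
    intro c w v hv
    by_cases h : ch = ' '
    · subst h
      simp only [charLoop, stepChar, reduceIte]
      rw [ih (c + 1) (if c + 1 = km then v else w) [] (by simp)]
      rw [splitSp_sep_append v t hv]
      simp only [List.nil_append, List.count_cons_self]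
      by_cases hk : c + 1 = km
      · subst hk
        rw [if_neg (by omega), if_pos rfl,
          if_pos (show c < c + 1 ∧ c + 1 ≤ c + ((t.count ' ' + 1 : Nat) : Int) from ⟨by omega, by omega⟩)]
        simp
      · by_cases hc : c + 1 < km ∧ km ≤ c + 1 + (t.count ' ' : Int)
        · rw [if_pos hc, if_pos (by push_cast; omega)]
          have hidx : (km - c - 1).toNat = (km - (c+1) - 1).toNat + 1 := by omega
          simp [hidx]
        · rw [if_neg hc, if_neg hk]
          rw [if_neg (show ¬ (c < km ∧ km ≤ c + ((t.count ' ' + 1 : Nat) : Int)) by push_cast at hc ⊢; omega)]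
    · simp only [charLoop, stepChar, if_neg h]
      have hv' : ' ' ∉ v ++ [ch] := by
        intro hm
        rcases List.mem_append.mp hm with h1 | h2
        · exact hv h1
        · simp at h2; exact h (h2.symm)
      rw [ih c w (v ++ [ch]) hv']
      have : v ++ [ch] ++ t = v ++ ch :: t := by simp
      rw [this]
      have hcnt : (ch :: t).count ' ' = t.count ' ' := by
        simp [h]
      rw [hcnt]

-- A's index loop over range(1, len(b)+1) equals the structural character loop
lemma loop_eq (bm : String) (km : Int) : ∀ (m k : Nat), k + m = bm.toList.length →
    ∀ (s : Int × String × String),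
    (PySem.List.pyRange ((k : Int) + 1) ((bm.toList.length : Int) + 1) 1).foldl (pvStepA bm km) s
      = (fun t => (t.1, String.ofList t.2.1, String.ofList t.2.2))
          (charLoop km (bm.toList.drop k) (s.1, s.2.1.toList, s.2.2.toList)) := by
  intro m
  induction m with
  | zero =>
    intro k hk s
    have h1 : PySem.List.pyRange ((k : Int) + 1) ((bm.toList.length : Int) + 1) 1 = [] := by
      apply PySem.List.pyRange_one_eq_nil
      omega
    have h2 : bm.toList.drop k = [] := by
      apply List.drop_eq_nil_of_le
      omega
    rw [h1, h2]
    simp [charLoop]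
  | succ m ih =>
    intro k hk s
    have hlt : k < bm.toList.length := by omega
    have hcons : PySem.List.pyRange ((k : Int) + 1) ((bm.toList.length : Int) + 1) 1
        = ((k : Int) + 1) :: PySem.List.pyRange (((k+1 : Nat) : Int) + 1) ((bm.toList.length : Int) + 1) 1 := by
      rw [PySem.List.pyRange_one_cons (by omega)]
      push_cast
      ring_nf
    rw [hcons, List.foldl_cons]
    set ch := bm.toList[k]'hlt with hch
    have hdrop : bm.toList.drop k = ch :: bm.toList.drop (k + 1) := by
      rw [List.drop_eq_getElem_cons hlt]
    have hslice : (PySem.Str.slice bm (some ((k : Int) + 1 - 1)) (some ((k : Int) + 1))).toList = [ch] := by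
      have h1 : ((k : Int) + 1 - 1) = (k : Int) := by ring
      have h2 : ((k : Int) + 1) = ((k : Int) + ((1 : Nat) : Int)) := by push_cast; ring
      rw [h1, h2, PySem.Str.toList_slice, PySem.Chars.slice_eq_listSlice,
        PySem.List.slice_natCast_add]
      rw [hdrop]
      simp
    have hstep : pvStepA bm km s ((k : Int) + 1)
        = (fun t => (t.1, String.ofList t.2.1, String.ofList t.2.2))
            (stepChar km (s.1, s.2.1.toList, s.2.2.toList) ch) := by
      simp only [pvStepA, stepChar]
      by_cases h : ch = ' '
      · have hy : PySem.Str.slice bm (some ((k : Int) + 1 - 1)) (some ((k : Int) + 1)) = " " := by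
          apply String.toList_injective
          rw [hslice, h]
          decide
        simp only [hy, h, reduceIte]
        simp only [beq_iff_eq]
        by_cases hk2 : s.1 + 1 = km
        · simp [hk2]
        · simp [hk2]
      · have hy : ¬ (PySem.Str.slice bm (some ((k : Int) + 1 - 1)) (some ((k : Int) + 1)) == " ") = true := by
          simp only [beq_iff_eq]
          intro he
          have := congrArg String.toList he
          rw [hslice] at this
          apply h
          have : [ch] = [' '] := by simpa using this
          simpa using this
        have h2 : s.2.2 ++ PySem.Str.slice bm (some ((k : Int) + 1 - 1)) (some ((k : Int) + 1))
            = String.ofList (s.2.2.toList ++ [ch]) := by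
          apply String.toList_injective
          rw [String.toList_append, hslice]
          simp
        simp only [if_neg hy, h, if_false]
        rw [← h2]
        simp
    rw [hstep]
    rw [ih (k + 1) (by omega) _]
    rw [hdrop]
    simp [charLoop]

theorem sacarpalmqj_eq (bmqj : String) (kmqj : Int) :
    sacarpalmqj bmqj kmqj = sacarpalmqj_alt bmqj kmqj := by
  unfold sacarpalmqj
  have hlen : PySem.Str.len (bmqj ++ " ") = ((bmqj ++ " ").toList.length : Int) := by
    simp [PySem.Str.len]
  have h0 : ((0 : Nat) : Int) + 1 = (1 : Int) := by norm_num
  have hL := loop_eq (bmqj ++ " ") kmqj ((bmqj ++ " ").toList.length) 0 (by omega) (0, "", "")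
  rw [h0] at hL
  simp only [hlen]
  rw [hL]
  have htl : (bmqj ++ " ").toList = bmqj.toList ++ [' '] := by simp
  have hvempty : ("" : String).toList = [] := by decide
  simp only [htl, List.drop_zero, hvempty]
  rw [charLoop_w kmqj (bmqj.toList ++ [' ']) 0 [] [] (by simp)]
  have hcnt : ((bmqj.toList ++ [' ']).count ' ' : Int) = (bmqj.toList.count ' ' : Int) + 1 := by
    push_cast [List.count_append]
    simp
  unfold sacarpalmqj_alt
  have hplen : ((splitSp bmqj.toList).length : Int) = (bmqj.toList.count ' ' : Int) + 1 := by
    rw [length_splitSp]; push_cast; ring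
  by_cases hc : 1 ≤ kmqj ∧ kmqj ≤ ((splitSp bmqj.toList).length : Int)
  · rw [if_pos (by rw [hcnt]; omega), if_pos hc]
    simp only [List.nil_append]
    rw [splitSp_append_space]
    have hidx : (kmqj - 0 - 1).toNat = (kmqj - 1).toNat := by omega
    rw [hidx]
    have hlt2 : (kmqj - 1).toNat < (splitSp bmqj.toList).length := by omega
    congr 1
    rw [List.getD_eq_getElem?_getD, List.getD_eq_getElem?_getD,
      List.getElem?_append_left hlt2]
  · rw [if_neg (by rw [hcnt]; omega), if_neg hc]

-- ===== VERDICT (by name: the statement is the Claim_ definition above) =====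
theorem sacarpalmqj_spec : Claim_equal_sacarpalmqj := by
  intro bmqj kmqj _
  unfold Spec_sacarpalmqj
  exact sacarpalmqj_eq bmqj kmqj
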